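-- pv_equiv track=rewrite | github.com/jelledochy/estate-chat-V2 | streamlit_app/pages/3_people.py | unique_people
-- ===== SOURCE A (Python) =====
-- from typing import Any
--
-- ORG_HINTS = (
--     " nv",
--     " bv",
--     " bvba",
--     " bank",
--     " foundation",
--     " purchasers",
--     "projects",
--     "residence",
--     "development",
--     "vastgoed",
-- )
--
-- SKIP_NAMES = {
--     "purchasing together",
--     "third-party purchasers",
-- }
--
-- def normalize_text(value: Any) -> str:
--     return " ".join(str(value or "").split())
--
-- def is_probably_person(raw_name: str) -> bool:
--     name = normalize_text(raw_name)
--     if not name: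
--         return False
--
--     lowered = f" {name.casefold()} "
--     if name.casefold() in SKIP_NAMES:
--         return False
--     if any(token in lowered for token in ORG_HINTS):
--         return False
--     return True
--
-- def normalize_person_name(raw_name: str) -> str | None:
--     name = normalize_text(raw_name)
--     if not is_probably_person(name):
--         return None
--     return name
--
-- def unique_people(names: list[str]) -> list[str]:
--     deduped: dict[str, str] = {}
--     for name in names:
--         normalized = normalize_person_name(name)
--         if not normalized:
--             continue
--         key = normalized.casefold()
--         if key not in deduped:
--             deduped[key] = normalized
--     return sorted(deduped.values(), key=lambda item: item.casefold())
-- ===== SOURCE B (Python) =====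
-- ORG_HINTS = (
--     " nv",
--     " bv",
--     " bvba",
--     " bank",
--     " foundation",
--     " purchasers",
--     "projects",
--     "residence",
--     "development",
--     "vastgoed",
-- )
--
-- SKIP_NAMES = {
--     "purchasing together",
--     "third-party purchasers",
-- }
--
--
-- def unique_people(names: list[str]) -> list[str]:
--     # One inline filtering pass (keeping duplicates), then a stable sort by
--     # casefold, then one adjacent-dedup walk keeping the first of each group.
--     people = []
--     for name in names:
--         cleaned = " ".join(str(name or "").split())
--         if not cleaned:
--             continue
--         low = cleaned.casefold()
--         if low in SKIP_NAMES:
--             continue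
--         padded = f" {low} "
--         if any(hint in padded for hint in ORG_HINTS):
--             continue
--         people.append(cleaned)
--     people.sort(key=str.casefold)
--     result = []
--     prev = None
--     for person in people:
--         key = person.casefold()
--         if key != prev:
--             result.append(person)
--             prev = key
--     return result
-- ===== Notes on version B (the rewrite author's own statement) =====
-- stated objective: alternative
-- what changed: Replaces A's dict-based dedup-then-sort (first-seen-key dict of normalized names, then sorted(values, key=casefold)) with a single inline filter pass keeping duplicates, a stable sort by casefold, and one adjacent-dedup walk that keeps the first element of each equal-casefold group.
import Mathlib
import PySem

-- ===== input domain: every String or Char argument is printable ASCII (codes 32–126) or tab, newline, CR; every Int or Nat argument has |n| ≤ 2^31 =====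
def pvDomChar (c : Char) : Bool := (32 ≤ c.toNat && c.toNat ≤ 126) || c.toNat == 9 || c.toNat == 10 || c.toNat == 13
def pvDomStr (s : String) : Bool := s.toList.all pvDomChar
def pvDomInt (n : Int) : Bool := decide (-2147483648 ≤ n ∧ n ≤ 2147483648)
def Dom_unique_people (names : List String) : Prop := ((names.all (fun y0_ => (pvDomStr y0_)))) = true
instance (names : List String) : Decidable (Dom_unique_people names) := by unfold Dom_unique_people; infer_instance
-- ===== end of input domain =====

-- B replaces A's first-seen-key dict + sort of the values by a filter pass, a stable
-- sort by casefold and one adjacent-dedup walk (alternative decomposition, same cost).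
-- `str.casefold` is ported as `PySem.Str.lower` (identical on the ASCII domain); the
-- sort key `item.casefold()` is compared at the `List Char` level, which is exactly
-- Python's code-point string order on this domain.

-- ===== PORT A =====
def pvOrgHints : List String :=
  [" nv", " bv", " bvba", " bank", " foundation", " purchasers",
   "projects", "residence", "development", "vastgoed"]

def pvSkipNames : PySem.Set String :=
  PySem.Set.ofList ["purchasing together", "third-party purchasers"]

-- normalize_text(value) = " ".join(str(value or "").split()); on a str argument
-- `value or ""` is `value` unless it is empty.
def pvNormalizeText (value : String) : String :=
  PySem.Str.join " " (PySem.Str.split₀ (if value = "" then "" else value))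

def pvIsProbablyPerson (rawName : String) : Bool :=
  let name := pvNormalizeText rawName
  if name = "" then false
  else
    -- lowered = f" {name.casefold()} "
    let lowered := String.ofList (' ' :: (PySem.Str.lower name).toList ++ [' '])
    if PySem.Set.contains pvSkipNames (PySem.Str.lower name) then false
    else if pvOrgHints.any (fun token => PySem.Str.isIn token lowered) then false
    else true

def pvNormalizePersonName (rawName : String) : Option String :=
  let name := pvNormalizeText rawName
  if ¬ pvIsProbablyPerson name then none else some name

def unique_people (names : List String) : List String :=
  let deduped : PySem.Dict String String :=
    names.foldl (fun d name =>
      match pvNormalizePersonName name with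
      | none => d                                  -- `if not normalized: continue` (None case)
      | some normalized =>
        if normalized = "" then d                  -- (empty-string falsy case of the same test)
        else
          let key := PySem.Str.lower normalized
          if d.contains key then d else d.insert key normalized) PySem.Dict.empty
  PySem.List.sorted deduped.values (fun item => (PySem.Str.lower item).toList) false

-- ===== PORT B =====
def unique_people_alt (names : List String) : List String :=
  let people : List String :=
    names.foldl (fun acc name =>
      let cleaned := PySem.Str.join " " (PySem.Str.split₀ (if name = "" then "" else name))
      if cleaned = "" then acc
      else
        let low := PySem.Str.lower cleaned
        if PySem.Set.contains pvSkipNames low then acc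
        else
          -- padded = f" {low} "
          let padded := String.ofList (' ' :: low.toList ++ [' '])
          if pvOrgHints.any (fun hint => PySem.Str.isIn hint padded) then acc
          else acc ++ [cleaned]) []
  let sortedPeople := PySem.List.sorted people (fun p => (PySem.Str.lower p).toList) false
  (sortedPeople.foldl (fun (st : List String × Option String) person =>
      let key := PySem.Str.lower person
      if st.2 = some key then st else (st.1 ++ [person], some key)) ([], none)).1

-- ===== PRECONDITION & SPEC =====
def Spec_unique_people (names : List String) (out : List String) : Prop := out = unique_people_alt names
instance (names : List String) (out : List String) : Decidable (Spec_unique_people names out) := by unfold Spec_unique_people; infer_instance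

-- ===== CLAIM (what is proved, stated in full; the proofs are below) =====
def Claim_equal_unique_people : Prop := ∀ (names : List String), Dom_unique_people names → Spec_unique_people names (unique_people names)

-- ===== LEMMAS AND PROOFS =====

-- casefold key, at the String and at the List Char level
def pvK (s : String) : String := PySem.Str.lower s
def pvKey (s : String) : List Char := (PySem.Str.lower s).toList

-- the per-element decision of B's filter pass (none = skipped by the loop)
def pvKeep (name : String) : Option String :=
  let cleaned := PySem.Str.join " " (PySem.Str.split₀ (if name = "" then "" else name))
  if cleaned = "" then none
  else
    let low := PySem.Str.lower cleaned
    if PySem.Set.contains pvSkipNames low then none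
    else
      let padded := String.ofList (' ' :: low.toList ++ [' '])
      if pvOrgHints.any (fun hint => PySem.Str.isIn hint padded) then none
      else some cleaned

-- A's dict-loop step and B's dedup-walk step, named for the proofs
def pvAStep (d : PySem.Dict String String) (name : String) : PySem.Dict String String :=
  match pvNormalizePersonName name with
  | none => d
  | some normalized =>
    if normalized = "" then d
    else
      let key := PySem.Str.lower normalized
      if d.contains key then d else d.insert key normalized

def pvDedupStep (st : List String × Option String) (person : String) : List String × Option String :=
  let key := PySem.Str.lower person
  if st.2 = some key then st else (st.1 ++ [person], some key)

-- first occurrence per casefold key, given the keys already seen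
def pvFirstOccAux (seen : List String) : List String → List String
  | [] => []
  | x :: t => if pvK x ∈ seen then pvFirstOccAux seen t
              else x :: pvFirstOccAux (seen ++ [pvK x]) t

-- PySem.List.sorted with the LinearOrder-derived DecidableLT (the instance the PySem order lemmas use)
def pvSortedM (xs : List String) : List String :=
  @PySem.List.sorted String (List Char) _ (@LinearOrder.toDecidableLT _ List.instLinearOrder) xs pvKey false

theorem pvSorted_eq (xs : List String) :
    PySem.List.sorted xs (fun s => (PySem.Str.lower s).toList) false = pvSortedM xs := by
  unfold pvSortedM
  congr 1

theorem pvNormalizeText_eq (v : String) :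
    pvNormalizeText v = PySem.Str.join " " (PySem.Str.split₀ v) := by
  unfold pvNormalizeText
  by_cases h : v = "" <;> simp [h]

def pvBKeepStep (acc : List String) (name : String) : List String :=
  match pvKeep name with
  | none => acc
  | some v => acc ++ [v]

theorem pvBKeepStep_foldl (l : List String) (acc : List String) :
    l.foldl pvBKeepStep acc = acc ++ l.filterMap pvKeep := by
  induction l generalizing acc with
  | nil => simp
  | cons x t ih =>
    cases h : pvKeep x <;> simp [List.foldl_cons, pvBKeepStep, h, ih]

theorem pvGo_word (w : List Char) (hw : ∀ c ∈ w, PySem.Chars.isspace c = false)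
    (rest cur : List Char) (acc : List (List Char)) :
    PySem.Chars.split₀.go (w ++ rest) cur acc = PySem.Chars.split₀.go rest (w.reverse ++ cur) acc := by
  induction w generalizing cur with
  | nil => simp
  | cons c t ih =>
    have hc : PySem.Chars.isspace c = false := hw c (by simp)
    have ht : ∀ x ∈ t, PySem.Chars.isspace x = false := fun x hx => hw x (by simp [hx])
    simp only [List.cons_append, PySem.Chars.split₀.go, hc, Bool.false_eq_true, if_false,
      List.reverse_cons]
    rw [ih ht]
    simp

-- every word split₀ produces is nonempty and whitespace-free

-- every word split₀ produces is nonempty and whitespace-free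
theorem pvGo_good (rest : List Char) (cur : List Char) (acc : List (List Char))
    (hacc : ∀ t ∈ acc, t ≠ [] ∧ ∀ c ∈ t, PySem.Chars.isspace c = false)
    (hcur : ∀ c ∈ cur, PySem.Chars.isspace c = false) :
    ∀ t ∈ PySem.Chars.split₀.go rest cur acc, t ≠ [] ∧ ∀ c ∈ t, PySem.Chars.isspace c = false := by
  induction rest generalizing cur acc with
  | nil =>
    intro t ht
    by_cases hc : cur.isEmpty
    · simp only [PySem.Chars.split₀.go, hc, if_pos, List.mem_reverse] at ht
      exact hacc t ht
    · simp only [PySem.Chars.split₀.go, hc, Bool.false_eq_true, if_false, List.mem_reverse,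
        List.mem_cons] at ht
      rcases ht with rfl | ht
      · constructor
        · simpa [List.isEmpty_iff] using hc
        · intro c hc'; exact hcur c (by simpa using hc')
      · exact hacc t ht
  | cons c rest ih =>
    by_cases hs : PySem.Chars.isspace c
    · by_cases hc : cur.isEmpty
      · simp only [PySem.Chars.split₀.go, hs, if_pos, hc]
        exact ih [] acc hacc (by simp)
      · simp only [PySem.Chars.split₀.go, hs, if_pos, hc, Bool.false_eq_true, if_false]
        refine ih [] (cur.reverse :: acc) ?_ (by simp)
        intro t ht
        rcases List.mem_cons.mp ht with rfl | ht
        · exact ⟨by simpa [List.isEmpty_iff] using hc, fun c' hc' => hcur c' (by simpa using hc')⟩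
        · exact hacc t ht
    · simp only [PySem.Chars.split₀.go, hs, Bool.false_eq_true, if_false]
      refine ih (c :: cur) acc hacc ?_
      intro c' hc'
      rcases List.mem_cons.mp hc' with rfl | hc'
      · simpa using hs
      · exact hcur c' hc'

theorem pvSplit₀_good (cs : List Char) :
    ∀ t ∈ PySem.Chars.split₀ cs, t ≠ [] ∧ ∀ c ∈ t, PySem.Chars.isspace c = false := by
  exact pvGo_good cs [] [] (by simp) (by simp)

-- splitting a single-space join of good words gives the words back

-- splitting a single-space join of good words gives the words back
theorem pvSplit₀_join (ts : List (List Char))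
    (h : ∀ t ∈ ts, t ≠ [] ∧ ∀ c ∈ t, PySem.Chars.isspace c = false) :
    PySem.Chars.split₀ (PySem.Chars.join [' '] ts) = ts := by
  suffices H : ∀ ts (acc : List (List Char)),
      (∀ t ∈ ts, t ≠ [] ∧ ∀ c ∈ t, PySem.Chars.isspace c = false) →
      PySem.Chars.split₀.go (PySem.Chars.join [' '] ts) [] acc = acc.reverse ++ ts by
    simpa using H ts [] h
  intro ts
  induction ts with
  | nil => intro acc _; simp [PySem.Chars.join_nil, PySem.Chars.split₀.go]
  | cons t ts ih =>
    intro acc hgood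
    have ht := hgood t (by simp)
    cases ts with
    | nil =>
      rw [PySem.Chars.join_singleton]
      rw [show PySem.Chars.split₀.go t [] acc = PySem.Chars.split₀.go (t ++ []) [] acc from by simp,
        pvGo_word t ht.2 [] [] acc]
      simp only [PySem.Chars.split₀.go, List.append_nil]
      have hne : t.reverse.isEmpty = false := by
        simp; simpa using ht.1
      rw [hne]
      simp
    | cons t2 ts2 =>
      rw [PySem.Chars.join_cons_cons]
      rw [List.append_assoc, pvGo_word t ht.2 _ [] acc]
      have hne : (t.reverse ++ []).isEmpty = false := by
        simp; simpa using ht.1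
      simp only [List.cons_append, List.nil_append, PySem.Chars.split₀.go,
        show PySem.Chars.isspace ' ' = true from rfl, if_pos, List.append_nil] at *
      rw [show t.reverse.isEmpty = false from by simpa using hne]
      simp only [Bool.false_eq_true, if_false, List.reverse_reverse]
      rw [ih (t :: acc) (fun x hx => hgood x (by simp [hx]))]
      simp

theorem pvSplit₀_normalize (s : String) :
    PySem.Str.split₀ (pvNormalizeText s) = PySem.Str.split₀ s := by
  rw [pvNormalizeText_eq]
  show List.map String.ofList (PySem.Chars.split₀ (PySem.Str.join " " (PySem.Str.split₀ s)).toList)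
      = PySem.Str.split₀ s
  rw [PySem.Str.toList_join]
  rw [PySem.Str.split₀_map_toList]
  rw [show (" " : String).toList = [' '] from rfl]
  rw [pvSplit₀_join _ (pvSplit₀_good s.toList)]
  rfl

theorem pvNormalizeText_idem (s : String) :
    pvNormalizeText (pvNormalizeText s) = pvNormalizeText s := by
  conv_lhs => rw [pvNormalizeText_eq, pvSplit₀_normalize]
  rw [pvNormalizeText_eq]

theorem pvNorm_eq_keep (s : String) : pvNormalizePersonName s = pvKeep s := by
  have hip : pvIsProbablyPerson (pvNormalizeText s) =
      (if pvNormalizeText s = "" then false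
       else if PySem.Set.contains pvSkipNames (PySem.Str.lower (pvNormalizeText s)) then false
       else if pvOrgHints.any (fun token => PySem.Str.isIn token
           (String.ofList (' ' :: (PySem.Str.lower (pvNormalizeText s)).toList ++ [' ']))) then false
       else true) := by
    show (if pvNormalizeText (pvNormalizeText s) = "" then false
       else if PySem.Set.contains pvSkipNames (PySem.Str.lower (pvNormalizeText (pvNormalizeText s))) then false
       else if pvOrgHints.any (fun token => PySem.Str.isIn token
           (String.ofList (' ' :: (PySem.Str.lower (pvNormalizeText (pvNormalizeText s))).toList ++ [' ']))) then false
       else true) = _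
    rw [pvNormalizeText_idem]
  show (if ¬ pvIsProbablyPerson (pvNormalizeText s) then none else some (pvNormalizeText s))
      = (if pvNormalizeText s = "" then none
       else if PySem.Set.contains pvSkipNames (PySem.Str.lower (pvNormalizeText s)) then none
       else if pvOrgHints.any (fun token => PySem.Str.isIn token
           (String.ofList (' ' :: (PySem.Str.lower (pvNormalizeText s)).toList ++ [' ']))) then none
       else some (pvNormalizeText s))
  rw [hip]
  split_ifs <;> simp_all

theorem pvKeep_eq (s : String) : pvKeep s =
    (if pvNormalizeText s = "" then none
     else if PySem.Set.contains pvSkipNames (PySem.Str.lower (pvNormalizeText s)) then none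
     else if pvOrgHints.any (fun token => PySem.Str.isIn token
         (String.ofList (' ' :: (PySem.Str.lower (pvNormalizeText s)).toList ++ [' ']))) then none
     else some (pvNormalizeText s)) := rfl

theorem pvKeep_ne_empty {s n : String} (h : pvKeep s = some n) : n ≠ "" := by
  rw [pvKeep_eq] at h
  by_cases h1 : pvNormalizeText s = ""
  · rw [if_pos h1] at h; cases h
  · rw [if_neg h1] at h
    split_ifs at h
    all_goals try cases h
    all_goals exact h1

theorem pvAItems (l : List String) (d : PySem.Dict String String) (hnd : d.keys.Nodup) :
    (l.foldl pvAStep d).items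
      = d.items ++ (pvFirstOccAux d.keys (l.filterMap pvKeep)).map (fun x => (pvK x, x)) := by
  induction l generalizing d with
  | nil => simp [pvFirstOccAux]
  | cons name t ih =>
    rw [List.foldl_cons]
    have hstep : pvAStep d name =
        (match pvKeep name with
         | none => d
         | some normalized =>
           if normalized = "" then d
           else if d.contains (PySem.Str.lower normalized) then d
           else d.insert (PySem.Str.lower normalized) normalized) := by
      unfold pvAStep
      rw [pvNorm_eq_keep]
    cases hk : pvKeep name with
    | none =>
      rw [hstep, hk]
      simp only [List.filterMap_cons, hk]
      exact ih d hnd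
    | some n =>
      have hne : n ≠ "" := pvKeep_ne_empty hk
      rw [hstep, hk]
      simp only [hne, if_false, List.filterMap_cons, hk]
      by_cases hc : d.contains (PySem.Str.lower n) = true
      · rw [if_pos hc]
        have hmem : pvK n ∈ d.keys := (PySem.Dict.contains_iff_mem_keys d _).mp hc
        rw [ih d hnd]
        simp only [pvFirstOccAux, hmem, if_pos]
      · rw [if_neg hc]
        have hc' : d.contains (PySem.Str.lower n) = false := by simpa using hc
        have hkeys := PySem.Dict.keys_insert_of_not_contains d n hc'
        have hitems := PySem.Dict.items_insert_of_not_contains d n hc'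
        have hnd' : (d.insert (PySem.Str.lower n) n).keys.Nodup :=
          PySem.Dict.nodup_keys_insert d _ n hnd
        rw [ih _ hnd', hitems, hkeys]
        have hnm : pvK n ∉ d.keys := fun hm =>
          hc ((PySem.Dict.contains_iff_mem_keys d _).mpr hm)
        simp only [pvFirstOccAux, hnm, if_neg, not_false_iff, List.map_cons]
        show (d.items ++ [(pvK n, n)]) ++ _ = d.items ++ (pvK n, n) :: _
        simp [pvK]

theorem pvAux_not_mem_seen {seen : List String} {l : List String} {x : String}
    (h : x ∈ pvFirstOccAux seen l) : pvK x ∉ seen := by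
  induction l generalizing seen with
  | nil => simp [pvFirstOccAux] at h
  | cons y t ih =>
    by_cases hy : pvK y ∈ seen
    · exact ih (by simpa [pvFirstOccAux, hy] using h)
    · rcases (by simpa [pvFirstOccAux, hy] using h : x = y ∨ x ∈ pvFirstOccAux (seen ++ [pvK y]) t) with rfl | hm
      · exact hy
      · intro hs; exact ih hm (by simp [hs])

theorem pvAux_sublist (seen l : List String) : (pvFirstOccAux seen l).Sublist l := by
  induction l generalizing seen with
  | nil => simp [pvFirstOccAux]
  | cons y t ih =>
    by_cases hy : pvK y ∈ seen
    · simp only [pvFirstOccAux, hy, if_pos]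
      exact (ih seen).trans (List.sublist_cons_self y t)
    · simp only [pvFirstOccAux, hy, if_neg, not_false_iff]
      exact (ih _).cons₂ y

theorem pvAux_map_nodup (seen l : List String) (hs : seen.Nodup) :
    ((pvFirstOccAux seen l).map pvK).Nodup := by
  induction l generalizing seen with
  | nil => simp [pvFirstOccAux]
  | cons y t ih =>
    by_cases hy : pvK y ∈ seen
    · simpa [pvFirstOccAux, hy] using ih seen hs
    · simp only [pvFirstOccAux, hy, if_neg, not_false_iff, List.map_cons, List.nodup_cons]
      refine ⟨?_, ih (seen ++ [pvK y]) (by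
        rw [List.nodup_append]
        refine ⟨hs, List.nodup_singleton _, ?_⟩
        intro a ha b hb
        rw [List.mem_singleton] at hb
        subst hb
        exact fun h => hy (h ▸ ha))⟩
      intro hmem
      rcases List.mem_map.mp hmem with ⟨z, hz, hkz⟩
      have := pvAux_not_mem_seen hz
      simp [hkz] at this


theorem pvMem_aux_iff (seen l : List String) (x : String) :
    x ∈ pvFirstOccAux seen l
      ↔ (pvK x ∉ seen ∧ (l.filter (fun y => decide (pvK y = pvK x))).head? = some x) := by
  induction l generalizing seen with
  | nil => simp [pvFirstOccAux]
  | cons y t ih =>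
    by_cases hy : pvK y ∈ seen
    · simp only [pvFirstOccAux, hy, if_pos, List.filter_cons]
      by_cases hxy : pvK y = pvK x
      · constructor
        · intro h
          exact absurd (hxy ▸ hy) (pvAux_not_mem_seen h)
        · rintro ⟨hx, -⟩
          exact absurd (hxy ▸ hy) hx
      · simp only [hxy, decide_false, Bool.false_eq_true, if_false]
        exact ih seen
    · simp only [pvFirstOccAux, hy, if_neg, not_false_iff, List.mem_cons, List.filter_cons]
      by_cases hxy : x = y
      · subst hxy
        simp [hy]
      · constructor
        · intro h
          rcases h with rfl | h
          · exact absurd rfl hxy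
          · have h2 := (ih (seen ++ [pvK y])).mp h
            have hne : pvK y ≠ pvK x := by
              intro he
              exact h2.1 (by simp [he])
            refine ⟨fun hs => h2.1 (by simp [hs]), ?_⟩
            simpa [hne] using h2.2
        · rintro ⟨hx, hh⟩
          by_cases hne : pvK y = pvK x
          · rw [if_pos (by simp [hne])] at hh
            simp only [List.head?_cons, Option.some_inj] at hh
            exact absurd hh.symm hxy
          · rw [if_neg (by simp [hne])] at hh
            right
            refine (ih (seen ++ [pvK y])).mpr ⟨?_, hh⟩
            intro hs
            rcases List.mem_append.mp hs with hs | hs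
            · exact hx hs
            · rw [List.mem_singleton] at hs
              exact hne hs.symm

theorem pvInsertBy_filter (before : String → String → Bool)
    (hb : ∀ a b, before a b = true ↔ pvKey a < pvKey b)
    (ys : List String) (x : String) (k0 : String)
    (hp : ys.Pairwise (fun a b => pvKey a ≤ pvKey b)) :
    (PySem.List.insertBy before x ys).filter (fun y => decide (pvK y = k0))
      = ys.filter (fun y => decide (pvK y = k0)) ++ (if pvK x = k0 then [x] else []) := by
  induction ys with
  | nil => simp [PySem.List.insertBy]; by_cases h : pvK x = k0 <;> simp [h]
  | cons y t ih =>
    rw [List.pairwise_cons] at hp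
    by_cases hbt : before x y = true
    · rw [show PySem.List.insertBy before x (y :: t) = x :: y :: t from by
        simp [PySem.List.insertBy, hbt]]
      have hlt : pvKey x < pvKey y := (hb x y).mp hbt
      by_cases hx : pvK x = k0
      · -- nothing in y :: t has key k0
        have hnone : ∀ z ∈ y :: t, pvK z ≠ k0 := by
          intro z hz he
          have hyz : pvKey y ≤ pvKey z := by
            rcases List.mem_cons.mp hz with rfl | hz
            · exact le_refl _
            · exact hp.1 z hz
          have : pvKey x < pvKey z := lt_of_lt_of_le hlt hyz
          have hzx : pvKey z = pvKey x := by
            show (pvK z).toList = (pvK x).toList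
            rw [he, hx]
          exact absurd hzx (ne_of_gt this)
        rw [List.filter_cons_of_pos (by simp [hx])]
        have hrest : (y :: t).filter (fun y => decide (pvK y = k0)) = [] := by
          rw [List.filter_eq_nil_iff]
          intro z hz
          simp [hnone z hz]
        rw [hrest]
        simp [hx]
      · rw [List.filter_cons_of_neg (by simp [hx])]
        simp [hx]
    · rw [show PySem.List.insertBy before x (y :: t) = y :: PySem.List.insertBy before x t from by
        simp [PySem.List.insertBy, hbt]]
      rw [List.filter_cons, List.filter_cons, ih hp.2]
      by_cases hy : pvK y = k0 <;> simp [hy]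

theorem pvSortedM_pairwise (xs : List String) :
    (pvSortedM xs).Pairwise (fun a b => pvKey a ≤ pvKey b) := by
  unfold pvSortedM
  exact PySem.List.sorted_pairwise xs pvKey


theorem pvSortedM_split (xs : List String) (x : String) :
    ∃ before : String → String → Bool,
      pvSortedM (xs ++ [x]) = PySem.List.insertBy before x (pvSortedM xs) ∧
      ∀ a b, before a b = true ↔ pvKey a < pvKey b := by
  refine ⟨?before, ?heq, ?hb⟩
  case heq =>
    unfold pvSortedM
    rw [@PySem.List.sorted_eq_foldl_insertBy String (List Char) _
          (@LinearOrder.toDecidableLT _ List.instLinearOrder) (xs ++ [x]) pvKey,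
        @PySem.List.sorted_eq_foldl_insertBy String (List Char) _
          (@LinearOrder.toDecidableLT _ List.instLinearOrder) xs pvKey,
        List.foldl_append]
    rfl
  case hb =>
    intro a b
    simp only [decide_eq_true_eq]

set_option maxHeartbeats 1000000 in
theorem pvSortedM_filter (xs : List String) (k0 : String) :
    (pvSortedM xs).filter (fun y => decide (pvK y = k0))
      = xs.filter (fun y => decide (pvK y = k0)) := by
  induction xs using List.reverseRecOn with
  | nil => rfl
  | append_singleton xs x ih =>
    obtain ⟨before, heq, hb⟩ := pvSortedM_split xs x
    rw [heq, pvInsertBy_filter before hb _ x k0 (pvSortedM_pairwise xs),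
      ih, List.filter_append]
    by_cases hx : pvK x = k0 <;> simp [hx]

def pvInv (S : List String) (p : Option String) (l : List String) : Prop :=
  (p = none → S = []) ∧
  (∀ q, p = some q → q ∈ S ∧ (∀ s ∈ S, s.toList ≤ q.toList) ∧ (∀ y ∈ l, q.toList ≤ pvKey y))

theorem pvDedup_eq_aux (l : List String) (S acc : List String) (p : Option String)
    (hp : l.Pairwise (fun a b => pvKey a ≤ pvKey b)) (hinv : pvInv S p l) :
    (l.foldl pvDedupStep (acc, p)).1 = acc ++ pvFirstOccAux S l := by
  induction l generalizing S acc p with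
  | nil => simp [pvFirstOccAux]
  | cons x t ih =>
    rw [List.pairwise_cons] at hp
    have hmem_iff : pvK x ∈ S ↔ p = some (pvK x) := by
      constructor
      · intro hm
        cases p with
        | none => rw [hinv.1 rfl] at hm; cases hm
        | some q =>
          obtain ⟨hqS, hSle, hql⟩ := hinv.2 q rfl
          have h1 : (pvK x).toList ≤ q.toList := hSle _ hm
          have h2 : q.toList ≤ (pvK x).toList := hql x (by simp)
          have : q = pvK x := String.toList_inj.mp (le_antisymm h2 h1)
          rw [this]
      · intro hm
        exact (hinv.2 (pvK x) hm).1
    rw [List.foldl_cons]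
    by_cases hx : p = some (pvK x)
    · rw [show pvDedupStep (acc, p) x = (acc, p) from by
        simp only [pvDedupStep]
        rw [if_pos (show p = some (PySem.Str.lower x) from hx)]]
      have hinv' : pvInv S p t := by
        refine ⟨hinv.1, ?_⟩
        intro q hq
        obtain ⟨h1, h2, h3⟩ := hinv.2 q hq
        exact ⟨h1, h2, fun y hy => h3 y (by simp [hy])⟩
      rw [ih S acc p hp.2 hinv']
      rw [show pvFirstOccAux S (x :: t) = pvFirstOccAux S t from by
        simp [pvFirstOccAux, hmem_iff.mpr hx]]
    · rw [show pvDedupStep (acc, p) x = (acc ++ [x], some (PySem.Str.lower x)) from by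
        simp only [pvDedupStep]
        rw [if_neg (show ¬ p = some (PySem.Str.lower x) from hx)]]
      have hnm : pvK x ∉ S := fun hm => hx (hmem_iff.mp hm)
      rw [show pvFirstOccAux S (x :: t) = x :: pvFirstOccAux (S ++ [pvK x]) t from by
        simp [pvFirstOccAux, hnm]]
      have hinv' : pvInv (S ++ [pvK x]) (some (PySem.Str.lower x)) t := by
        refine ⟨(fun h => by cases h), ?_⟩
        intro q hq
        injection hq with hq
        subst hq
        refine ⟨by simp [pvK], ?_, ?_⟩
        · intro s hs
          rcases List.mem_append.mp hs with hs | hs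
          · cases p with
            | none => rw [hinv.1 rfl] at hs; cases hs
            | some q' =>
              obtain ⟨h1, h2, h3⟩ := hinv.2 q' rfl
              exact le_trans (h2 s hs) (h3 x (by simp))
          · rw [List.mem_singleton] at hs; subst hs; exact le_refl _
        · intro y hy
          exact hp.1 y hy
      rw [ih (S ++ [pvK x]) (acc ++ [x]) (some (PySem.Str.lower x)) hp.2 hinv']
      simp

theorem pvMain (vs : List String) :
    pvSortedM (pvFirstOccAux [] vs) = pvFirstOccAux [] (pvSortedM vs) := by
  have hmem : ∀ x, x ∈ pvFirstOccAux [] (pvSortedM vs) ↔ x ∈ pvFirstOccAux [] vs := by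
    intro x
    rw [pvMem_aux_iff, pvMem_aux_iff, pvSortedM_filter]
  have hnd1 : (pvFirstOccAux [] (pvSortedM vs)).Nodup :=
    (pvAux_map_nodup [] _ List.nodup_nil).of_map
  have hnd2 : (pvFirstOccAux [] vs).Nodup :=
    (pvAux_map_nodup [] _ List.nodup_nil).of_map
  have hperm : (pvFirstOccAux [] (pvSortedM vs)).Perm (pvFirstOccAux [] vs) :=
    (List.perm_ext_iff_of_nodup hnd1 hnd2).mpr hmem
  have hle : (pvFirstOccAux [] (pvSortedM vs)).Pairwise (fun a b => pvKey a ≤ pvKey b) :=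
    (pvSortedM_pairwise vs).sublist (pvAux_sublist [] (pvSortedM vs))
  have hne : (pvFirstOccAux [] (pvSortedM vs)).Pairwise (fun a b => pvK a ≠ pvK b) :=
    List.pairwise_map.mp (pvAux_map_nodup [] (pvSortedM vs) List.nodup_nil)
  have hlt : (pvFirstOccAux [] (pvSortedM vs)).Pairwise (fun a b => pvKey a < pvKey b) := by
    have hand := hle.and hne
    exact hand.imp (fun {a b} h =>
      lt_of_le_of_ne h.1 (fun he => h.2 (String.toList_inj.mp he)))
  unfold pvSortedM
  exact @PySem.List.sorted_eq_of_perm_of_pairwise_lt String (List Char) List.instLinearOrder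
    (pvFirstOccAux [] vs) (pvFirstOccAux [] (pvSortedM vs)) pvKey hperm hlt

theorem pvA_unfold (names : List String) :
    unique_people names
      = PySem.List.sorted ((names.foldl pvAStep PySem.Dict.empty).values)
          (fun item => (PySem.Str.lower item).toList) false := by
  unfold unique_people pvAStep
  rfl

theorem pvA_values (names : List String) :
    (names.foldl pvAStep PySem.Dict.empty).values
      = pvFirstOccAux [] (names.filterMap pvKeep) := by
  have h := pvAItems names PySem.Dict.empty
    (by rw [PySem.Dict.keys_empty]; exact List.nodup_nil)
  show ((names.foldl pvAStep PySem.Dict.empty).items).map Prod.snd = _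
  rw [h, PySem.Dict.keys_empty]
  rw [show (PySem.Dict.empty : PySem.Dict String String).items = [] from rfl]
  simp [Function.comp_def]

theorem pvBStep_eq (acc : List String) (name : String) :
    (let cleaned := PySem.Str.join " " (PySem.Str.split₀ (if name = "" then "" else name))
     if cleaned = "" then acc
     else
       let low := PySem.Str.lower cleaned
       if PySem.Set.contains pvSkipNames low then acc
       else
         let padded := String.ofList (' ' :: low.toList ++ [' '])
         if pvOrgHints.any (fun hint => PySem.Str.isIn hint padded) then acc
         else acc ++ [cleaned])
    = pvBKeepStep acc name := by
  unfold pvBKeepStep pvKeep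
  dsimp only
  split_ifs <;> rfl

theorem pvB_unfold (names : List String) :
    unique_people_alt names
      = ((PySem.List.sorted (names.filterMap pvKeep)
            (fun p => (PySem.Str.lower p).toList) false).foldl
          pvDedupStep ([], none)).1 := by
  have hpeople : names.foldl (fun (acc : List String) name =>
      let cleaned := PySem.Str.join " " (PySem.Str.split₀ (if name = "" then "" else name))
      if cleaned = "" then acc
      else
        let low := PySem.Str.lower cleaned
        if PySem.Set.contains pvSkipNames low then acc
        else
          let padded := String.ofList (' ' :: low.toList ++ [' '])
          if pvOrgHints.any (fun hint => PySem.Str.isIn hint padded) then acc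
          else acc ++ [cleaned]) []
      = names.filterMap pvKeep := by
    rw [show (fun (acc : List String) name =>
        let cleaned := PySem.Str.join " " (PySem.Str.split₀ (if name = "" then "" else name))
        if cleaned = "" then acc
        else
          let low := PySem.Str.lower cleaned
          if PySem.Set.contains pvSkipNames low then acc
          else
            let padded := String.ofList (' ' :: low.toList ++ [' '])
            if pvOrgHints.any (fun hint => PySem.Str.isIn hint padded) then acc
            else acc ++ [cleaned])
      = pvBKeepStep
      from funext fun acc => funext fun name => pvBStep_eq acc name]
    exact pvBKeepStep_foldl names []
  unfold unique_people_alt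
  rw [hpeople]
  rfl

-- ===== VERDICT (by name: the statement is the Claim_ definition above) =====
set_option maxHeartbeats 2000000 in
theorem unique_people_spec : Claim_equal_unique_people := by
  intro names _
  show unique_people names = unique_people_alt names
  rw [pvA_unfold, pvA_values, pvSorted_eq, pvMain]
  rw [pvB_unfold, pvSorted_eq]
  rw [pvDedup_eq_aux (pvSortedM (names.filterMap pvKeep)) [] [] none
    (pvSortedM_pairwise _) ⟨fun _ => rfl, fun q h => by cases h⟩]
  rw [List.nil_append]
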